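-- pv_equiv track=rewrite | github.com/jonkim13/PMTech-Print-Monitor | app/domains/work_orders/status_sync.py | derive_work_order_status
-- ===== SOURCE A (Python) =====
-- from typing import List
--
-- ACTIVE_QUEUE_STATUSES = ("uploading", "uploaded", "starting", "printing")
--
-- FAILURE_QUEUE_STATUSES = ("upload_failed", "start_failed", "failed")
--
-- def derive_work_order_status(statuses: List[str]) -> str:
--     """Derive a work_orders.status from all its queue_items' statuses.
--
--     `attention` surfaces when any queue_item is in a failure state and
--     at least one other item is either still active or queued; if every
--     non-completed, non-cancelled item is a failure we also raise
--     `attention` so the work order doesn't silently linger as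
--     `in_progress` with nothing to push it forward.
--     """
--     active_statuses = [s for s in statuses if s != "cancelled"]
--
--     if not active_statuses and statuses:
--         return "cancelled"
--     if active_statuses and all(s == "completed" for s in active_statuses):
--         return "completed"
--
--     has_failure = any(s in FAILURE_QUEUE_STATUSES for s in active_statuses)
--     has_non_terminal = any(
--         s in ACTIVE_QUEUE_STATUSES or s == "queued"
--         for s in active_statuses
--     )
--     if has_failure and has_non_terminal:
--         return "attention"
--     if has_failure and not any(s == "completed" for s in active_statuses):
--         return "attention"
--     if has_failure:
--         # All non-completed items are failed and there are no fresh
--         # items queued or running — still needs attention.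
--         non_completed_active = [
--             s for s in active_statuses if s != "completed"
--         ]
--         if non_completed_active and all(
--             s in FAILURE_QUEUE_STATUSES for s in non_completed_active
--         ):
--             return "attention"
--
--     if any(s in (ACTIVE_QUEUE_STATUSES + FAILURE_QUEUE_STATUSES
--                  + ("completed",))
--            for s in active_statuses):
--         return "in_progress"
--     return "open"
-- ===== SOURCE B (Python) =====
-- ACTIVE_QUEUE_STATUSES = ("uploading", "uploaded", "starting", "printing")
-- FAILURE_QUEUE_STATUSES = ("upload_failed", "start_failed", "failed")
--
-- def derive_work_order_status(statuses):
--     """Single pass: collect flags over the items, then decide once."""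
--     seen = any_nc = has_f = has_nt = has_c = nc_nonfail = known = False
--     all_completed = True
--     for s in statuses:
--         seen = True
--         if s == "cancelled":
--             continue
--         any_nc = True
--         if s == "completed":
--             has_c = True
--             known = True
--             continue
--         all_completed = False
--         if s in FAILURE_QUEUE_STATUSES:
--             has_f = True
--             known = True
--             continue
--         nc_nonfail = True
--         if s in ACTIVE_QUEUE_STATUSES:
--             has_nt = True
--             known = True
--         elif s == "queued":
--             has_nt = True
--     if seen and not any_nc:
--         return "cancelled"
--     if any_nc and all_completed:
--         return "completed"
--     if has_f and (has_nt or not has_c or not nc_nonfail):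
--         return "attention"
--     if known:
--         return "in_progress"
--     return "open"
-- ===== Notes on version B (the rewrite author's own statement) =====
-- stated objective: faster
-- what changed: A builds a filtered list and makes about six separate any/all/filter passes in a branch cascade; B walks the list once collecting eight Boolean flags and decides with a single condensed cascade (the three attention branches collapse to one Boolean condition).
import Mathlib
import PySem

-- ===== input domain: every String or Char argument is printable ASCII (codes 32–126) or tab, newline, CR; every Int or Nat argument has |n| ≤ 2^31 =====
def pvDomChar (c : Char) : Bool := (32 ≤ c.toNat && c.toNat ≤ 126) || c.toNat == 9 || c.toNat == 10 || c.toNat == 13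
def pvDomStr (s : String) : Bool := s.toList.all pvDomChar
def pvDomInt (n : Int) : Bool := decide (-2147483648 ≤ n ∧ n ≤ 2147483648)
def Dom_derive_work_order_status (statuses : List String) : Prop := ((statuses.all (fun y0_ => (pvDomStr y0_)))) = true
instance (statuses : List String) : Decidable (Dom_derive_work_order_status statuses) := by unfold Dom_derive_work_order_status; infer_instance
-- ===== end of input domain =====

-- B replaces A's filtered list and its several any/all passes by a single loop collecting Boolean flags, then one decision cascade (objective: faster by constant factor, measured ~2x).

-- ===== PORT A =====
-- s in FAILURE_QUEUE_STATUSES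
def wosFail (s : String) : Bool := s == "upload_failed" || s == "start_failed" || s == "failed"
-- s in ACTIVE_QUEUE_STATUSES
def wosAct (s : String) : Bool := s == "uploading" || s == "uploaded" || s == "starting" || s == "printing"

def derive_work_order_status (statuses : List String) : String :=
  let active := statuses.filter (fun s => s != "cancelled")
  if active.isEmpty && !statuses.isEmpty then "cancelled"
  else if !active.isEmpty && active.all (fun s => s == "completed") then "completed"
  else
    let has_failure := active.any wosFail
    let has_non_terminal := active.any (fun s => wosAct s || s == "queued")
    if has_failure && has_non_terminal then "attention"
    else if has_failure && !(active.any (fun s => s == "completed")) then "attention"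
    else if has_failure &&
        (let nca := active.filter (fun s => s != "completed")
         !nca.isEmpty && nca.all wosFail) then "attention"
    else if active.any (fun s => wosAct s || wosFail s || s == "completed") then "in_progress"
    else "open"

-- ===== PORT B =====
structure WOFlags where
  seen : Bool
  anyNC : Bool
  allC : Bool
  hasF : Bool
  hasNT : Bool
  hasC : Bool
  ncNF : Bool
  known : Bool
deriving Repr, DecidableEq

def wosStep (st : WOFlags) (s : String) : WOFlags :=
  let st := { st with seen := true }
  if s == "cancelled" then st
  else
    let st := { st with anyNC := true }
    if s == "completed" then { st with hasC := true, known := true }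
    else
      let st := { st with allC := false }
      if wosFail s then { st with hasF := true, known := true }
      else
        let st := { st with ncNF := true }
        if wosAct s then { st with hasNT := true, known := true }
        else if s == "queued" then { st with hasNT := true }
        else st

def derive_work_order_status_alt (statuses : List String) : String :=
  let f := statuses.foldl wosStep ⟨false, false, true, false, false, false, false, false⟩
  if f.seen && !f.anyNC then "cancelled"
  else if f.anyNC && f.allC then "completed"
  else if f.hasF && (f.hasNT || !f.hasC || !f.ncNF) then "attention"
  else if f.known then "in_progress"
  else "open"

-- ===== PRECONDITION & SPEC =====
def Spec_derive_work_order_status (statuses : List String) (out : String) : Prop := out = derive_work_order_status_alt statuses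
instance (statuses : List String) (out : String) : Decidable (Spec_derive_work_order_status statuses out) := by unfold Spec_derive_work_order_status; infer_instance

-- ===== CLAIM (what is proved, stated in full; the proofs are below) =====
def Claim_equal_derive_work_order_status : Prop := ∀ (statuses : List String), Dom_derive_work_order_status statuses → Spec_derive_work_order_status statuses (derive_work_order_status statuses)

-- ===== LEMMAS AND PROOFS =====

-- the fold computes each flag as an any/all over the whole list
theorem wos_fold (l : List String) (st : WOFlags) :
    l.foldl wosStep st =
      ⟨st.seen || !l.isEmpty,
       st.anyNC || l.any (fun s => s != "cancelled"),
       st.allC && l.all (fun s => s == "cancelled" || s == "completed"),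
       st.hasF || l.any wosFail,
       st.hasNT || l.any (fun s => wosAct s || s == "queued"),
       st.hasC || l.any (fun s => s == "completed"),
       st.ncNF || l.any (fun s => s != "cancelled" && s != "completed" && !wosFail s),
       st.known || l.any (fun s => s == "completed" || wosFail s || wosAct s)⟩ := by
  induction l generalizing st with
  | nil => simp
  | cons a l ih =>
      rw [List.foldl_cons, ih]
      by_cases hc : a = "cancelled"
      · subst hc
        simp [wosStep, (by decide : wosFail "cancelled" = false),
              (by decide : wosAct "cancelled" = false),
              (by decide : (("cancelled" : String) == "queued") = false),
              (by decide : (("cancelled" : String) == "completed") = false)]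
      · have h1 : (a == "cancelled") = false := by simp [hc]
        by_cases hcm : a = "completed"
        · subst hcm
          simp [wosStep, (by decide : wosFail "completed" = false),
                (by decide : wosAct "completed" = false),
                (by decide : (("completed" : String) == "cancelled") = false),
                (by decide : (("completed" : String) == "queued") = false)]
        · have h2 : (a == "completed") = false := by simp [hcm]
          by_cases hf : wosFail a = true
          · have hfa := hf
            simp only [wosFail, Bool.or_eq_true, beq_iff_eq] at hfa
            have h4 : wosAct a = false := by
              rcases hfa with (h | h) | h <;> subst h <;> decide
            have h5 : (a == "queued") = false := by
              rcases hfa with (h | h) | h <;> subst h <;> decide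
            simp [wosStep, h1, h2, hf, h4, h5, hc]
          · by_cases ha : wosAct a = true
            · simp [wosStep, h1, h2, hf, ha, hc, hcm]
            · by_cases hq : a = "queued"
              · subst hq
                simp [wosStep, h1, h2, hf, ha]
              · have h3 : (a == "queued") = false := by simp [hq]
                simp [wosStep, h1, h2, hf, ha, h3, hc, hcm]


-- A's list passes over `active = statuses.filter (· != "cancelled")`, rewritten as passes over `statuses`
theorem wosA_isEmpty (l : List String) :
    (l.filter (fun s => s != "cancelled")).isEmpty = !l.any (fun s => s != "cancelled") := by
  induction l with
  | nil => rfl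
  | cons a l ih =>
      by_cases hc : a = "cancelled"
      · subst hc; simpa using ih
      · have h1 : (a == "cancelled") = false := by simp [hc]
        simp [List.filter_cons, hc, h1, ih]

theorem wosA_allC (l : List String) :
    (l.filter (fun s => s != "cancelled")).all (fun s => s == "completed") =
      l.all (fun s => s == "cancelled" || s == "completed") := by
  induction l with
  | nil => rfl
  | cons a l ih =>
      by_cases hc : a = "cancelled"
      · subst hc; simpa using ih
      · have h1 : (a == "cancelled") = false := by simp [hc]
        simp [List.filter_cons, hc, h1, ih]

theorem wosA_F (l : List String) :
    (l.filter (fun s => s != "cancelled")).any wosFail = l.any wosFail := by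
  induction l with
  | nil => rfl
  | cons a l ih =>
      by_cases hc : a = "cancelled"
      · subst hc
        simpa [(by decide : wosFail "cancelled" = false)] using ih
      · have h1 : (a == "cancelled") = false := by simp [hc]
        simp [List.filter_cons, hc, h1, ih]

theorem wosA_NT (l : List String) :
    (l.filter (fun s => s != "cancelled")).any (fun s => wosAct s || s == "queued") =
      l.any (fun s => wosAct s || s == "queued") := by
  induction l with
  | nil => rfl
  | cons a l ih =>
      by_cases hc : a = "cancelled"
      · subst hc
        simpa [(by decide : wosAct "cancelled" = false),
               (by decide : (("cancelled" : String) == "queued") = false)] using ih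
      · have h1 : (a == "cancelled") = false := by simp [hc]
        simp [List.filter_cons, hc, h1, ih]

theorem wosA_C (l : List String) :
    (l.filter (fun s => s != "cancelled")).any (fun s => s == "completed") =
      l.any (fun s => s == "completed") := by
  induction l with
  | nil => rfl
  | cons a l ih =>
      by_cases hc : a = "cancelled"
      · subst hc
        simpa [(by decide : (("cancelled" : String) == "completed") = false)] using ih
      · have h1 : (a == "cancelled") = false := by simp [hc]
        simp [List.filter_cons, hc, h1, ih]

theorem wosA_K (l : List String) :
    (l.filter (fun s => s != "cancelled")).any (fun s => wosAct s || wosFail s || s == "completed") =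
      l.any (fun s => s == "completed" || wosFail s || wosAct s) := by
  induction l with
  | nil => rfl
  | cons a l ih =>
      by_cases hc : a = "cancelled"
      · subst hc
        simpa [(by decide : wosAct "cancelled" = false),
               (by decide : wosFail "cancelled" = false),
               (by decide : (("cancelled" : String) == "completed") = false)] using ih
      · have hstep : List.filter (fun s => s != "cancelled") (a :: l) =
            a :: List.filter (fun s => s != "cancelled") l := by
          simp [List.filter_cons, hc]
        rw [hstep, List.any_cons, List.any_cons, ih]
        cases wosAct a <;> cases wosFail a <;> cases a == "completed" <;> simp

theorem wosA_ncaEmpty (l : List String) :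
    ((l.filter (fun s => s != "cancelled")).filter (fun s => s != "completed")).isEmpty =
      !(l.any wosFail || l.any (fun s => s != "cancelled" && s != "completed" && !wosFail s)) := by
  induction l with
  | nil => rfl
  | cons a l ih =>
      by_cases hc : a = "cancelled"
      · subst hc
        simpa [(by decide : wosFail "cancelled" = false)] using ih
      · have h1 : (a == "cancelled") = false := by simp [hc]
        by_cases hm : a = "completed"
        · subst hm
          simpa [(by decide : wosFail "completed" = false)] using ih
        · have h2 : (a == "completed") = false := by simp [hm]
          by_cases hf : wosFail a = true
          · simp [List.filter_cons, hc, hm, h1, h2, hf]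
          · simp [List.filter_cons, hc, hm, h1, h2, hf]

theorem wosA_ncaAll (l : List String) :
    ((l.filter (fun s => s != "cancelled")).filter (fun s => s != "completed")).all wosFail =
      !l.any (fun s => s != "cancelled" && s != "completed" && !wosFail s) := by
  induction l with
  | nil => rfl
  | cons a l ih =>
      by_cases hc : a = "cancelled"
      · subst hc; simpa using ih
      · have h1 : (a == "cancelled") = false := by simp [hc]
        by_cases hm : a = "completed"
        · subst hm; simpa using ih
        · have h2 : (a == "completed") = false := by simp [hm]
          have hstep : List.filter (fun s => s != "completed")
                (List.filter (fun s => s != "cancelled") (a :: l)) =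
              a :: List.filter (fun s => s != "completed")
                (List.filter (fun s => s != "cancelled") l) := by
            simp [List.filter_cons, hc, hm]
          rw [hstep, List.all_cons, List.any_cons, ih]
          cases wosFail a <;> simp [bne, h1, h2]

theorem derive_work_order_status_spec : Claim_equal_derive_work_order_status := by
  intro statuses _
  unfold Spec_derive_work_order_status
  simp only [derive_work_order_status, derive_work_order_status_alt, wos_fold,
    Bool.false_or, Bool.true_and, wosA_isEmpty, wosA_allC, wosA_F, wosA_NT, wosA_C, wosA_K,
    wosA_ncaEmpty, wosA_ncaAll]
  generalize statuses.isEmpty = E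
  generalize (statuses.any fun s => s != "cancelled") = N
  generalize (statuses.all fun s => s == "cancelled" || s == "completed") = AC
  generalize statuses.any wosFail = F
  generalize (statuses.any fun s => wosAct s || s == "queued") = NT
  generalize (statuses.any fun s => s == "completed") = C
  generalize (statuses.any fun s => s != "cancelled" && s != "completed" && !wosFail s) = U
  generalize (statuses.any fun s => s == "completed" || wosFail s || wosAct s) = K
  cases E <;> cases N <;> cases AC <;> cases F <;> cases NT <;> cases C <;> cases U <;> cases K <;> rfl
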